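-- pv_equiv track=rewrite | github.com/annacasass/AB | P1/compare_sequences/sol_move_seq2.py | move_seq2
-- ===== SOURCE A (Python) =====
-- def move_seq2(seq1, seq2):
--     """
--     >>> move_seq2("THEFASTCAT", "THEFATCAT")
--     ['THEFASTCAT---------', 'THEFATCAT----------', '-THEFATCAT---------', '--THEFATCAT--------', '---THEFATCAT-------', '----THEFATCAT------', '-----THEFATCAT-----', '------THEFATCAT----', '-------THEFATCAT---', '--------THEFATCAT--', '---------THEFATCAT-', '----------THEFATCAT']
--     >>> move_seq2("THEFASTCAT", "AFASTCAT")
--     ['THEFASTCAT--------', 'AFASTCAT----------', '-AFASTCAT---------', '--AFASTCAT--------', '---AFASTCAT-------', '----AFASTCAT------', '-----AFASTCAT-----', '------AFASTCAT----', '-------AFASTCAT---', '--------AFASTCAT--', '---------AFASTCAT-', '----------AFASTCAT']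
--     >>> move_seq2("THEFASTCAT", "THECAT")
--     ['THEFASTCAT------', 'THECAT----------', '-THECAT---------', '--THECAT--------', '---THECAT-------', '----THECAT------', '-----THECAT-----', '------THECAT----', '-------THECAT---', '--------THECAT--', '---------THECAT-', '----------THECAT']
--     """
--     # Total length both sequences need to be
--     total_length = len(seq1) + len(seq2)
--
--     # First alignment: seq1 with gaps at the end
--     alignments = [seq1 + "-" * len(seq2)]
--
--     # Generate all positions where seq2 can start (0 to len(seq1))
--     for start_position in range(len(seq1) + 1):
--         leading_gaps = "-" * start_position
--         trailing_gaps = "-" * (total_length - start_position - len(seq2))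
--         aligned_seq2 = leading_gaps + seq2 + trailing_gaps
--         alignments.append(aligned_seq2)
--
--     return alignments
-- ===== SOURCE B (Python) =====
-- def move_seq2(seq1, seq2):
--     # First row: seq1 padded with gaps on the right.
--     alignments = [seq1 + "-" * len(seq2)]
--     # Start-0 alignment of seq2, then derive each next alignment by sliding:
--     # prepend one leading gap and drop one trailing gap.
--     cur = seq2 + "-" * len(seq1)
--     alignments.append(cur)
--     for _ in range(len(seq1)):
--         cur = "-" + cur[:-1]
--         alignments.append(cur)
--     return alignments
-- ===== Notes on version B (the rewrite author's own statement) =====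
-- stated objective: simpler
-- what changed: B derives each alignment string from the previous one by sliding it ('-' + cur[:-1]) instead of recomputing leading/trailing gap counts arithmetically for every start position.
import Mathlib
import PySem

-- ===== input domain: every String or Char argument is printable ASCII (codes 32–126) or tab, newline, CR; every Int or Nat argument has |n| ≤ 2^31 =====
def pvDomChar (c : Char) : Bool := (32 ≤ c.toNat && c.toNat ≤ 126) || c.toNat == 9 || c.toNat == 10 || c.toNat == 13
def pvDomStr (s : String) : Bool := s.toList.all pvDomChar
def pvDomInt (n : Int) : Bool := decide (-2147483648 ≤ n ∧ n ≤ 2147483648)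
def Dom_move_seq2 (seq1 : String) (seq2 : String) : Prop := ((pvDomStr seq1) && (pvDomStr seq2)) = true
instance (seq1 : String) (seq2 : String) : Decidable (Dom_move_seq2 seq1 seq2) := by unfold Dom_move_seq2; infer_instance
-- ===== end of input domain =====

-- B derives each alignment from the previous one by sliding ('-' + cur[:-1]) instead of
-- recomputing the leading/trailing gap counts arithmetically at every start position (objective: simpler).

-- ===== PORT A =====
-- "-" * n is List.replicate n '-' on the char list (exact: nonnegative repetition of a one-char string).
def move_seq2 (seq1 : String) (seq2 : String) : List String :=
  let s1 := seq1.toList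
  let s2 := seq2.toList
  let total_length : Int := (s1.length : Int) + (s2.length : Int)
  let alignments : List String := [String.ofList (s1 ++ List.replicate s2.length '-')]
  (PySem.List.pyRange 0 ((s1.length : Int) + 1) 1).foldl
    (fun acc start_position =>
      let leading_gaps := List.replicate start_position.toNat '-'
      let trailing_gaps := List.replicate (total_length - start_position - (s2.length : Int)).toNat '-'
      let aligned_seq2 := leading_gaps ++ s2 ++ trailing_gaps
      acc ++ [String.ofList aligned_seq2])
    alignments

-- ===== PORT B =====
-- the sliding loop: fuel = remaining iterations; cur[:-1] is PySem.Chars.slice cur none (some (-1)).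
def slideLoop (fuel : Nat) (cur : List Char) (acc : List String) : List String :=
  match fuel with
  | 0 => acc
  | k + 1 =>
      let cur' := '-' :: PySem.List.slice cur none (some (-1))
      slideLoop k cur' (acc ++ [String.ofList cur'])

def move_seq2_alt (seq1 : String) (seq2 : String) : List String :=
  let s1 := seq1.toList
  let s2 := seq2.toList
  let first := String.ofList (s1 ++ List.replicate s2.length '-')
  let cur := s2 ++ List.replicate s1.length '-'
  slideLoop s1.length cur [first, String.ofList cur]

-- ===== PRECONDITION & SPEC =====
def Spec_move_seq2 (seq1 : String) (seq2 : String) (out : List String) : Prop := out = move_seq2_alt seq1 seq2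
instance (seq1 : String) (seq2 : String) (out : List String) : Decidable (Spec_move_seq2 seq1 seq2 out) := by unfold Spec_move_seq2; infer_instance

-- ===== CLAIM (what is proved, stated in full; the proofs are below) =====
def Claim_equal_move_seq2 : Prop := ∀ (seq1 : String) (seq2 : String), Dom_move_seq2 seq1 seq2 → Spec_move_seq2 seq1 seq2 (move_seq2 seq1 seq2)

-- ===== LEMMAS AND PROOFS =====

-- the k-th alignment row: k leading gaps, seq2, m trailing gaps
def mkRow (s2 : List Char) (k m : Nat) : String :=
  String.ofList (List.replicate k '-' ++ s2 ++ List.replicate m '-')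

theorem mkRow_congr (s2 : List Char) {a b a' b' : Nat} (h1 : a = a') (h2 : b = b') :
    mkRow s2 a b = mkRow s2 a' b' := by rw [h1, h2]

theorem slideLoop_eq (s2 : List Char) :
    ∀ (m k : Nat) (acc : List String),
      slideLoop m (List.replicate k '-' ++ s2 ++ List.replicate m '-') acc
        = acc ++ (List.range m).map (fun j => mkRow s2 (k + 1 + j) (m - 1 - j)) := by
  intro m
  induction m with
  | zero => intro k acc; simp [slideLoop]
  | succ n ih =>
      intro k acc
      have hdrop : PySem.List.slice
          (List.replicate k '-' ++ s2 ++ List.replicate (n + 1) '-') none (some (-1))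
          = List.replicate k '-' ++ s2 ++ List.replicate n '-' := by
        rw [PySem.List.slice_to_neg_one]
        conv_lhs => rw [List.replicate_succ', ← List.append_assoc, List.dropLast_concat]
      have hcur' : ('-' :: PySem.List.slice
          (List.replicate k '-' ++ s2 ++ List.replicate (n + 1) '-') none (some (-1)))
          = List.replicate (k + 1) '-' ++ s2 ++ List.replicate n '-' := by
        rw [hdrop, List.replicate_succ]
        simp
      show slideLoop n _ _ = _
      rw [hcur', ih (k + 1), List.range_succ_eq_map]
      simp only [List.map_cons, List.map_map, List.append_assoc, List.singleton_append]
      congr 1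
      congr 1
      · simp [mkRow, List.append_assoc]
      · apply List.map_congr_left
        intro j hj
        simp only [Function.comp_apply]
        exact mkRow_congr _ (by omega) (by omega)

theorem move_seq2_eq_rows (seq1 seq2 : String) :
    move_seq2 seq1 seq2
      = String.ofList (seq1.toList ++ List.replicate seq2.toList.length '-')
        :: (List.range (seq1.toList.length + 1)).map
            (fun k => mkRow seq2.toList k (seq1.toList.length - k)) := by
  unfold move_seq2
  dsimp only
  rw [show ((seq1.toList.length : Int) + 1) = ((seq1.toList.length + 1 : Nat) : Int) by push_cast; ring]
  rw [PySem.List.pyRange_zero_natCast]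
  rw [PySem.List.foldl_append_singleton_eq_map]
  simp only [List.map_map, List.singleton_append, List.cons.injEq, true_and]
  apply List.map_congr_left
  intro k hk
  rw [List.mem_range] at hk
  simp only [Function.comp_apply]
  unfold mkRow
  congr 4
  all_goals omega

theorem move_seq2_alt_eq_rows (seq1 seq2 : String) :
    move_seq2_alt seq1 seq2
      = String.ofList (seq1.toList ++ List.replicate seq2.toList.length '-')
        :: (List.range (seq1.toList.length + 1)).map
            (fun k => mkRow seq2.toList k (seq1.toList.length - k)) := by
  unfold move_seq2_alt
  dsimp only
  have h0 : seq2.toList ++ List.replicate seq1.toList.length '-'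
      = List.replicate 0 '-' ++ seq2.toList ++ List.replicate seq1.toList.length '-' := by simp
  rw [h0, slideLoop_eq]
  rw [List.range_succ_eq_map]
  simp only [List.map_map, List.map_cons]
  simp only [List.cons_append, List.nil_append]
  congr 2
  · apply List.map_congr_left
    intro j hj
    simp only [Function.comp_apply]
    exact mkRow_congr _ (by omega) (by omega)

-- ===== VERDICT (by name: the statement is the Claim_ definition above) =====
theorem move_seq2_spec : Claim_equal_move_seq2 := by
  intro seq1 seq2 _
  unfold Spec_move_seq2
  rw [move_seq2_eq_rows, move_seq2_alt_eq_rows]
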